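-- pv_equiv track=rewrite | github.com/consecrated-hammer/everday | backend/app/modules/tasks/services.py | _ValidateRepeatWeekdays
-- ===== SOURCE A (Python) =====
-- from typing import Iterable
--
-- def _ValidateRepeatWeekdays(values: Iterable[int]) -> list[int]:
--     cleaned = []
--     for value in values:
--         try:
--             number = int(value)
--         except (TypeError, ValueError):
--             continue
--         if 0 <= number <= 6:
--             cleaned.append(number)
--     return sorted(set(cleaned))
-- ===== SOURCE B (Python) =====
-- def _ValidateRepeatWeekdays(values):
--     vals = list(values)
--
--     def present(day):
--         for v in vals:
--             try:
--                 if int(v) == day: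
--                     return True
--             except (TypeError, ValueError):
--                 pass
--         return False
--
--     return [day for day in range(7) if present(day)]
-- ===== Notes on version B (the rewrite author's own statement) =====
-- stated objective: alternative
-- what changed: Inverts the iteration: instead of scanning the input once, filtering into a list and then sorted(set(...)), B scans the fixed domain 0..6 and for each day checks whether any input value parses to it, emitting the days in order - no set, no sort, no accumulator.
import Mathlib
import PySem

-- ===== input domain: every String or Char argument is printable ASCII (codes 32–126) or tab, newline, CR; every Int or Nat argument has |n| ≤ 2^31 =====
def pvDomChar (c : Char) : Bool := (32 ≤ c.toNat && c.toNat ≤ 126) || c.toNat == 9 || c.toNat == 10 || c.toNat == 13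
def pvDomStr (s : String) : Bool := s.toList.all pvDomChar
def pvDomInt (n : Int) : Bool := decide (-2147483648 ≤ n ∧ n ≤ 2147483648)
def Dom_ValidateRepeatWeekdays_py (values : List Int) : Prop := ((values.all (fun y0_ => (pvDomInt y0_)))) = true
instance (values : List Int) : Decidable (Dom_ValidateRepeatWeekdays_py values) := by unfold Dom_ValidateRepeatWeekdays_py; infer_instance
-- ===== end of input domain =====

-- B inverts the iteration: it scans the fixed domain 0..6 and keeps each day that some
-- input value equals, instead of filtering the input and then sorted(set(...)) (objective: alternative).

-- ===== PORT A =====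
-- cleaned = []; for value in values: number = int(value) (identity on ints; never raises);
-- if 0 <= number <= 6: cleaned.append(number); return sorted(set(cleaned))
def ValidateRepeatWeekdays_py (values : List Int) : List Int :=
  let cleaned := values.foldl (fun acc value =>
    let number := value
    if 0 ≤ number ∧ number ≤ 6 then acc ++ [number] else acc) []
  PySem.List.sorted (PySem.Set.ofList cleaned) (fun x => x) false

-- ===== PORT B =====
-- present(day) = linear scan of vals with early return True on int(v) == day (int is identity
-- on ints; never raises), ported as List.any; result = [day for day in range(7) if present(day)]
def ValidateRepeatWeekdays_py_alt (values : List Int) : List Int :=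
  let present := fun (day : Int) => values.any (fun v => v == day)
  (PySem.List.pyRange 0 7 1).filter (fun day => present day)

-- ===== PRECONDITION & SPEC =====
def Spec_ValidateRepeatWeekdays_py (values : List Int) (out : List Int) : Prop := out = ValidateRepeatWeekdays_py_alt values
instance (values : List Int) (out : List Int) : Decidable (Spec_ValidateRepeatWeekdays_py values out) := by unfold Spec_ValidateRepeatWeekdays_py; infer_instance

-- ===== CLAIM (what is proved, stated in full; the proofs are below) =====
def Claim_equal_ValidateRepeatWeekdays_py : Prop := ∀ (values : List Int), Dom_ValidateRepeatWeekdays_py values → Spec_ValidateRepeatWeekdays_py values (ValidateRepeatWeekdays_py values)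

-- ===== LEMMAS AND PROOFS =====

theorem ValidateRepeatWeekdays_py_spec : Claim_equal_ValidateRepeatWeekdays_py := by
  intro values _
  unfold Spec_ValidateRepeatWeekdays_py ValidateRepeatWeekdays_py ValidateRepeatWeekdays_py_alt
  simp only []
  -- A's cleaned list is the filter of values
  rw [show (fun (acc : List Int) (value : Int) =>
        let number := value
        if 0 ≤ number ∧ number ≤ 6 then acc ++ [number] else acc)
      = (fun acc value => if (decide (0 ≤ value ∧ value ≤ 6)) = true
          then acc ++ [(fun (x : Int) => x) value] else acc) from by
        funext a v; simp,
    PySem.List.foldl_append_if]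
  simp only [List.nil_append, List.map_id']
  have hcl : ∀ x : Int, x ∈ PySem.Set.ofList (List.filter (fun v => decide (0 ≤ v ∧ v ≤ 6)) values)
      ↔ (x ∈ values ∧ 0 ≤ x ∧ x ≤ 6) := by
    intro x; rw [PySem.Set.mem_ofList]; simp [List.mem_filter]
  have hrange : PySem.List.pyRange 0 7 1 = [0, 1, 2, 3, 4, 5, 6] := by decide
  rw [hrange]
  apply PySem.List.sorted_eq_of_perm_of_pairwise_lt
  · have hnodupB : (([0, 1, 2, 3, 4, 5, 6] : List Int).filter
        (fun day => values.any (fun v => v == day))).Nodup :=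
      List.filter_sublist.nodup (by decide)
    have hnodupA : (PySem.Set.ofList (List.filter (fun v => decide (0 ≤ v ∧ v ≤ 6)) values)).Nodup :=
      PySem.Set.nodup_ofList _
    rw [List.perm_ext_iff_of_nodup hnodupB hnodupA]
    intro x
    rw [hcl, List.mem_filter]
    constructor
    · rintro ⟨hx, hq⟩
      rw [List.any_eq_true] at hq
      obtain ⟨v, hv, hvx⟩ := hq
      exact ⟨(beq_iff_eq.mp hvx) ▸ hv, by fin_cases hx <;> omega⟩
    · rintro ⟨hxv, h0, h6⟩
      have hx : x ∈ ([0, 1, 2, 3, 4, 5, 6] : List Int) := by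
        interval_cases x <;> simp
      exact ⟨hx, List.any_eq_true.mpr ⟨x, hxv, beq_self_eq_true x⟩⟩
  · exact (by decide : ([0, 1, 2, 3, 4, 5, 6] : List Int).Pairwise (· < ·)).sublist List.filter_sublist
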